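-- pv_equiv track=rewrite | github.com/ansible/ansible-builder | src/ansible_builder/_target_scripts/introspect.py | simple_combine
-- ===== SOURCE A (Python) =====
-- def line_is_empty(line):
--     return bool((not line.strip()) or line.startswith('#'))
--
-- def simple_combine(reqs):
--     """Given a dictionary of requirement lines keyed off collections,
--     return a list with the most basic of de-duplication logic,
--     and comments indicating the sources based off the collection keys
--     """
--     consolidated = []
--     fancy_lines = []
--     for collection, lines in reqs.items():
--         for line in lines:
--             if line_is_empty(line):
--                 continue
--
--             base_line = line.split('#')[0].strip()
--             if base_line in consolidated:
--                 i = consolidated.index(base_line)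
--                 fancy_lines[i] += ', {}'.format(collection)
--             else:
--                 fancy_line = base_line + '  # from collection {}'.format(collection)
--                 consolidated.append(base_line)
--                 fancy_lines.append(fancy_line)
--
--     return fancy_lines
-- ===== SOURCE B (Python) =====
-- def line_is_empty(line):
--     return bool((not line.strip()) or line.startswith('#'))
--
-- def simple_combine(reqs):
--     # Flatten to (collection, base_line) pairs of the meaningful lines, then build the
--     # output non-destructively: one line per first-occurrence base, collecting its
--     # source collections by a per-base scan of the flat pair list.
--     pairs = [(collection, line.split('#')[0].strip())
--              for collection, lines in reqs.items()
--              for line in lines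
--              if not line_is_empty(line)]
--     return ['{}  # from collection {}'.format(base, ', '.join(c for c, b in pairs if b == base))
--             for base in dict.fromkeys(b for _, b in pairs)]
-- ===== Notes on version B (the rewrite author's own statement) =====
-- stated objective: alternative
-- what changed: A's single fused stateful loop that grows two parallel lists and patches fancy_lines[i] in place via an in/.index scan is replaced by a non-destructive staged pipeline: flatten reqs to a list of (collection, base_line) pairs, order-dedup the base lines with dict.fromkeys, and build each output line in one go by filtering the flat pair list for that base's collections.
import Mathlib
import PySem

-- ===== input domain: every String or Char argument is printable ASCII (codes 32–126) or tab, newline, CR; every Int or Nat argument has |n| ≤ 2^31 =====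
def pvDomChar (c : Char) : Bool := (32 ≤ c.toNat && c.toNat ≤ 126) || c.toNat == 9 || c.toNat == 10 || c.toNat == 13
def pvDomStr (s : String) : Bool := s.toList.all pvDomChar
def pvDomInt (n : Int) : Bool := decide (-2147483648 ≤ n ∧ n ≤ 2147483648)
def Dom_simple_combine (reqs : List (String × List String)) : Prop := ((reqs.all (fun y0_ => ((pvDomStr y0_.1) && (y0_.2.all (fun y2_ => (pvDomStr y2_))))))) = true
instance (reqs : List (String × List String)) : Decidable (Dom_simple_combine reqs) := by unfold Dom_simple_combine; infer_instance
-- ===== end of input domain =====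

-- B replaces A's fused stateful loop (parallel lists patched in place via in/.index) by a
-- staged pipeline: flatten to (collection, base_line) pairs, order-dedup the bases, then
-- build each output line by filtering the flat pair list for that base's collections.

-- ===== PORT A =====
-- shared helper from the Python module
def line_is_empty (line : String) : Bool :=
  (PySem.Str.strip line == "") || PySem.Str.startswith line "#"

-- line.split('#')[0].strip()  (split? is some since '#' ≠ ''; the list is never empty)
def pvBase (line : String) : String :=
  PySem.Str.strip (((PySem.Str.split? line "#").getD []).headD "")

-- the body of A's inner loop over `lines` (state: consolidated, fancy_lines)
def pvAStep (collection : String) (st : List String × List String) (line : String) :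
    List String × List String :=
  if line_is_empty line then st
  else
    let base := pvBase line
    if st.1.contains base then
      match PySem.List.index? st.1 base with
      | some i => (st.1, st.2.set i (st.2.getD i "" ++ (", " ++ collection)))
      | none => st  -- unreachable: guarded by the membership test
    else
      (st.1 ++ [base], st.2 ++ [base ++ ("  # from collection " ++ collection)])

def simple_combine (reqs : List (String × List String)) : List String :=
  (reqs.foldl (fun st p => p.2.foldl (pvAStep p.1) st) ([], [])).2

-- ===== PORT B =====
-- B's first stage: the flat list of (collection, base_line) pairs of the meaningful lines
def pvPairs (reqs : List (String × List String)) : List (String × String) :=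
  reqs.flatMap (fun p => (p.2.filter (fun l => !line_is_empty l)).map (fun l => (p.1, pvBase l)))

-- B's per-base output line: filter the flat pair list for this base's collections
def pvFancy (pairs : List (String × String)) (base : String) : String :=
  base ++ ("  # from collection " ++
    PySem.Str.join ", " ((pairs.filter (fun q => q.2 == base)).map (·.1)))

def simple_combine_alt (reqs : List (String × List String)) : List String :=
  let pairs := pvPairs reqs
  (PySem.List.dedup (pairs.map (·.2))).map (pvFancy pairs)

-- ===== PRECONDITION & SPEC =====
def Spec_simple_combine (reqs : List (String × List String)) (out : List String) : Prop := out = simple_combine_alt reqs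
instance (reqs : List (String × List String)) (out : List String) : Decidable (Spec_simple_combine reqs out) := by unfold Spec_simple_combine; infer_instance

-- ===== CLAIM (what is proved, stated in full; the proofs are below) =====
def Claim_equal_simple_combine : Prop := ∀ (reqs : List (String × List String)), Dom_simple_combine reqs → Spec_simple_combine reqs (simple_combine reqs)

-- ===== LEMMAS AND PROOFS =====

-- A's step, reshaped to act on one (collection, base) pair
def pvStepP (st : List String × List String) (q : String × String) :
    List String × List String :=
  if st.1.contains q.2 then
    match PySem.List.index? st.1 q.2 with
    | some i => (st.1, st.2.set i (st.2.getD i "" ++ (", " ++ q.1)))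
    | none => st
  else
    (st.1 ++ [q.2], st.2 ++ [q.2 ++ ("  # from collection " ++ q.1)])

lemma pvChars_join_append (sep x : List Char) (l : List (List Char)) (h : l ≠ []) :
    PySem.Chars.join sep (l ++ [x]) = PySem.Chars.join sep l ++ sep ++ x := by
  induction l with
  | nil => cases h rfl
  | cons a t ih =>
    cases t with
    | nil => simp [PySem.Chars.join_cons_cons, PySem.Chars.join_singleton]
    | cons b r =>
      rw [List.cons_append, PySem.Chars.join_cons_cons, List.cons_append,
        PySem.Chars.join_cons_cons]
      rw [show (b :: r) ++ [x] = b :: (r ++ [x]) from rfl] at *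
      rw [ih (by simp)]
      simp [List.append_assoc]

lemma pvJoin_singleton (c : String) : PySem.Str.join ", " [c] = c := by
  apply String.toList_injective
  simp [PySem.Str.toList_join, PySem.Chars.join_singleton]

lemma pvJoin_append (cs : List String) (c : String) (h : cs ≠ []) :
    PySem.Str.join ", " (cs ++ [c]) = PySem.Str.join ", " cs ++ (", " ++ c) := by
  apply String.toList_injective
  simp only [PySem.Str.toList_join, List.map_append, List.map_cons, List.map_nil,
    String.toList_append]
  rw [pvChars_join_append _ _ _ (by simpa using h)]
  simp [List.append_assoc]

lemma pvSet_append_len {α : Type} (xs ys : List α) (a b : α) :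
    (xs ++ a :: ys).set xs.length b = xs ++ b :: ys := by
  induction xs with
  | nil => rfl
  | cons x t ih => simp [ih]

lemma pvGetD_append_len {α : Type} (xs ys : List α) (a d : α) :
    (xs ++ a :: ys).getD xs.length d = a := by
  induction xs with
  | nil => rfl
  | cons x t ih => simp

-- pvFancy of an extended pair list
lemma pvFancy_append_ne (ps : List (String × String)) (q : String × String) (b : String)
    (h : q.2 ≠ b) : pvFancy (ps ++ [q]) b = pvFancy ps b := by
  simp [pvFancy, List.filter_append, h]

lemma pvFancy_append_self_of_mem (ps : List (String × String)) (q : String × String)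
    (h : q.2 ∈ ps.map Prod.snd) :
    pvFancy (ps ++ [q]) q.2 = pvFancy ps q.2 ++ (", " ++ q.1) := by
  have hne : (ps.filter (fun r => r.2 == q.2)).map (·.1) ≠ [] := by
    obtain ⟨p, hp, hpq⟩ := List.mem_map.mp h
    have : p ∈ ps.filter (fun r => r.2 == q.2) := List.mem_filter.mpr ⟨hp, by simp [hpq]⟩
    simp only [ne_eq, List.map_eq_nil_iff]
    intro hnil
    rw [hnil] at this
    exact List.not_mem_nil this
  simp only [pvFancy, List.filter_append, List.filter_cons, List.filter_nil,
    beq_self_eq_true, if_pos, List.map_append, List.map_cons, List.map_nil]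
  rw [pvJoin_append _ _ hne]
  simp [String.append_assoc]

lemma pvFancy_append_self_of_not_mem (ps : List (String × String)) (q : String × String)
    (h : q.2 ∉ ps.map Prod.snd) :
    pvFancy (ps ++ [q]) q.2 = q.2 ++ ("  # from collection " ++ q.1) := by
  have hnil : ps.filter (fun r => r.2 == q.2) = [] := by
    rw [List.filter_eq_nil_iff]
    intro p hp
    simp only [beq_iff_eq]
    intro hpq
    exact h (List.mem_map.mpr ⟨p, hp, hpq⟩)
  simp [pvFancy, List.filter_append, hnil, pvJoin_singleton]

-- dedup of an extended list
lemma pvDedup_append (bs : List String) (b : String) :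
    PySem.List.dedup (bs ++ [b]) =
      if b ∈ bs then PySem.List.dedup bs else PySem.List.dedup bs ++ [b] := by
  simp only [PySem.List.dedup_eq_ofList, PySem.Set.ofList_eq_foldl, List.foldl_append,
    List.foldl_cons, List.foldl_nil]
  rw [← PySem.Set.ofList_eq_foldl, PySem.Set.add]
  have hc : PySem.Set.contains (PySem.Set.ofList bs) b = decide (b ∈ bs) := by
    by_cases h : b ∈ bs
    · simp [h, PySem.Set.contains, PySem.Set.mem_ofList]
    · simp [h, PySem.Set.contains, PySem.Set.mem_ofList]
  rw [hc]
  by_cases h : b ∈ bs <;> simp [h]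

-- the invariant: the fold of A's reshaped step over the pair list equals B's staged result
lemma pvFold_eq (ps : List (String × String)) :
    ps.foldl pvStepP ([], []) =
      (PySem.List.dedup (ps.map Prod.snd),
       (PySem.List.dedup (ps.map Prod.snd)).map (pvFancy ps)) := by
  induction ps using List.reverseRecOn with
  | nil => rfl
  | append_singleton ps q ih =>
    rw [List.foldl_append, List.foldl_cons, List.foldl_nil, ih, List.map_append,
      List.map_cons, List.map_nil, pvDedup_append]
    by_cases h : q.2 ∈ ps.map Prod.snd
    · -- base already seen: A patches the line in place, B's filter gains one collection
      rw [if_pos h]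
      have hc : (PySem.List.dedup (ps.map Prod.snd)).contains q.2 = true := by
        simp [h]
      have hmem : q.2 ∈ PySem.List.dedup (ps.map Prod.snd) := (PySem.List.mem_dedup _ _).mpr h
      obtain ⟨i, hi⟩ : ∃ i, PySem.List.index? (PySem.List.dedup (ps.map Prod.snd)) q.2 = some i :=
        Option.isSome_iff_exists.mp ((PySem.List.index?_isSome_iff _ _).mpr hmem)
      obtain ⟨pre, suf, hdec, hlen, hpre⟩ := (PySem.List.index?_eq_some_iff _ _ _).mp hi
      have hsuf : q.2 ∉ suf := by
        have hnd := PySem.List.nodup_dedup (ps.map Prod.snd)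
        rw [hdec] at hnd
        exact (List.nodup_cons.mp hnd.of_append_right).1
      simp only [pvStepP, hc, if_true, hi]
      refine Prod.ext rfl ?_
      have hmpre : pre.map (pvFancy ps) = pre.map (pvFancy (ps ++ [q])) :=
        List.map_congr_left fun k hk => (pvFancy_append_ne ps q k (fun e => hpre (e ▸ hk))).symm
      have hmsuf : suf.map (pvFancy ps) = suf.map (pvFancy (ps ++ [q])) :=
        List.map_congr_left fun k hk => (pvFancy_append_ne ps q k (fun e => hsuf (e ▸ hk))).symm
      conv_lhs => rw [hdec, List.map_append, List.map_cons]
      conv_rhs => rw [hdec, List.map_append, List.map_cons]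
      rw [← hlen, ← List.length_map (f := pvFancy ps) (as := pre)]
      rw [pvGetD_append_len, pvSet_append_len, hmpre, hmsuf,
        pvFancy_append_self_of_mem ps q h]
    · -- new base: both append one line, B's filter finds exactly this collection
      rw [if_neg h]
      have hc : (PySem.List.dedup (ps.map Prod.snd)).contains q.2 = false := by
        simp [h]
      simp only [pvStepP, hc, Bool.false_eq_true, if_false]
      refine Prod.ext rfl ?_
      rw [List.map_append, List.map_cons, List.map_nil,
        pvFancy_append_self_of_not_mem ps q h]
      have : (PySem.List.dedup (ps.map Prod.snd)).map (pvFancy ps)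
          = (PySem.List.dedup (ps.map Prod.snd)).map (pvFancy (ps ++ [q])) :=
        List.map_congr_left fun k hk => (pvFancy_append_ne ps q k
          (fun e => h (e ▸ (PySem.List.mem_dedup _ _).mp hk))).symm
      rw [this]

-- one collection's inner loop, as a fold of pvStepP over its filtered-and-mapped pairs
lemma pvInner (c : String) (lines : List String) (st : List String × List String) :
    lines.foldl (pvAStep c) st
      = ((lines.filter (fun l => !line_is_empty l)).map (fun l => (c, pvBase l))).foldl pvStepP st := by
  rw [List.foldl_map, ← PySem.List.foldl_if_eq_foldl_filter]
  apply PySem.List.foldl_congr_mem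
  intro acc x _
  by_cases h : line_is_empty x = true <;> simp [pvAStep, pvStepP, h]

-- A's nested loops are the fold of pvStepP over the flattened pair list
lemma pvA_eq_fold (reqs : List (String × List String)) :
    reqs.foldl (fun st p => p.2.foldl (pvAStep p.1) st) ([], []) =
      (pvPairs reqs).foldl pvStepP ([], []) := by
  suffices h : ∀ st, reqs.foldl (fun st p => p.2.foldl (pvAStep p.1) st) st
      = (pvPairs reqs).foldl pvStepP st from h _
  induction reqs with
  | nil => intro st; rfl
  | cons p t ih =>
    intro st
    rw [List.foldl_cons, ih]
    simp only [pvPairs, List.flatMap_cons, List.foldl_append, pvInner]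

-- ===== VERDICT (by name: the statement is the Claim_ definition above) =====
theorem simple_combine_spec : Claim_equal_simple_combine := by
  intro reqs _
  unfold Spec_simple_combine simple_combine simple_combine_alt
  rw [pvA_eq_fold, pvFold_eq]
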